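-- pv_equiv track=rewrite | github.com/Rafael10Diez/Machine-Learning-Distributed-Nusselt-Numbers-Efficient | source/core/gather_data.py | find_once
-- ===== SOURCE A (Python) =====
-- def find_once(tag , A):
--     # find element in A[i] that contains "tag"
--     n = 0  # number of repetitions
--     for x in A:
--         if tag in x:
--             result  = x            # record line found
--             n      += x.count(tag) # count number of matches
--     assert n == 1                  # assert only one match was found
--     return result
-- ===== SOURCE B (Python) =====
-- def find_once(tag, A):
--     # reduction first: total number of occurrences of tag across A
--     total = sum(x.count(tag) for x in A)
--     assert total == 1
--     # then the search: first (= only) element containing tag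
--     return next(x for x in A if tag in x)
-- ===== Notes on version B (the rewrite author's own statement) =====
-- stated objective: simpler
-- what changed: B separates the reduction from the search: one pass sums all occurrence counts (the asserted quantity), a second pass locates the first element containing the tag, instead of A's single loop that interleaves counting with recording the last match.
import Mathlib
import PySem

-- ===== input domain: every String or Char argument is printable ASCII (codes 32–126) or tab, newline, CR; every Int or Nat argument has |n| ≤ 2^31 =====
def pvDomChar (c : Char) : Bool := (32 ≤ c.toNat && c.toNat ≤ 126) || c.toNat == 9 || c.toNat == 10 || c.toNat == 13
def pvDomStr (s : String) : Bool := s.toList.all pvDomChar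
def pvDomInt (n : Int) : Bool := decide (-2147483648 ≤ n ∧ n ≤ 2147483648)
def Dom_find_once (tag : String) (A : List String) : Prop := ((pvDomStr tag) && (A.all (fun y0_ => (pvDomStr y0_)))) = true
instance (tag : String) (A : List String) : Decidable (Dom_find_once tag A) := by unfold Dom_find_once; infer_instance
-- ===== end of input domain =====

-- B separates the reduction (summing occurrence counts) from the search (first element
-- containing the tag); A interleaves both in one loop recording the last match. Equal under
-- Pre_ (total count = 1), where the unique match is both the first and the last one.

-- ===== PORT A =====
-- single loop: n accumulates x.count(tag) over elements containing tag, result records the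
-- last such element; the 'assert n == 1' (and the unbound 'result' when no match) raise —
-- those inputs are exactly the ones excluded by Pre_find_once.
def find_once (tag : String) (A : List String) : String :=
  let st := A.foldl
    (fun (st : Int × Option String) x =>
      if PySem.Str.isIn tag x then (st.1 + (PySem.Str.count x tag : Int), some x) else st)
    (0, none)
  st.2.getD ""

-- ===== PORT B =====
-- reduction pass (total, checked by the assert — raising inputs excluded by Pre_find_once),
-- then search pass (first element containing tag).
def find_once_alt (tag : String) (A : List String) : String :=
  let _total : Int := (A.map (fun x => (PySem.Str.count x tag : Int))).sum
  (A.find? (fun x => PySem.Str.isIn tag x)).getD ""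

-- ===== PRECONDITION & SPEC =====
-- Pre_ holds exactly when the total occurrence count is 1: otherwise Python A raises
-- (AssertionError, or NameError when no element matches).
def Pre_find_once (tag : String) (A : List String) : Prop :=
  (A.map (fun x => (PySem.Str.count x tag : Int))).sum = 1
instance (tag : String) (A : List String) : Decidable (Pre_find_once tag A) := by
  unfold Pre_find_once; infer_instance

def pvWitness_find_once : String × List String := ("a", ["xbc", "abc"])

def Spec_find_once (tag : String) (A : List String) (out : String) : Prop := out = find_once_alt tag A
instance (tag : String) (A : List String) (out : String) : Decidable (Spec_find_once tag A out) := by unfold Spec_find_once; infer_instance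

-- ===== CLAIM (what is proved, stated in full; the proofs are below) =====
def Claim_equal_find_once : Prop := ∀ (tag : String) (A : List String), Dom_find_once tag A → Pre_find_once tag A → Spec_find_once tag A (find_once tag A)

-- ===== LEMMAS AND PROOFS =====

-- count.go never decreases the accumulator
theorem pv_go_le (sub : List Char) (fuel : Nat) (l : List Char) (acc : Nat) :
    acc ≤ PySem.Chars.count.go sub fuel l acc := by
  induction fuel generalizing l acc with
  | zero => simp [PySem.Chars.count.go]
  | succ fuel ih =>
    cases l with
    | nil => simp [PySem.Chars.count.go]
    | cons h t =>
      rw [PySem.Chars.count.go]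
      split
      · exact le_trans (Nat.le_succ acc) (ih _ _)
      · exact ih _ _

-- if sub occurs nowhere, the go-loop returns the accumulator unchanged
theorem pv_go_zero (sub : List Char) (fuel : Nat) (l : List Char) (acc : Nat)
    (h : ∀ j, ¬ sub <+: l.drop j) :
    PySem.Chars.count.go sub fuel l acc = acc := by
  induction fuel generalizing l acc with
  | zero => simp [PySem.Chars.count.go]
  | succ fuel ih =>
    cases l with
    | nil => simp [PySem.Chars.count.go]
    | cons x t =>
      rw [PySem.Chars.count.go]
      split
      · exact absurd (List.isPrefixOf_iff_prefix.mp (by assumption)) (by simpa using h 0)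
      · exact ih t acc (fun j => by simpa using h (j + 1))

-- if sub (nonempty) occurs somewhere in l, the go-loop with fuel = length returns ≥ 1
theorem pv_go_pos (sub : List Char) (hsub : sub ≠ []) (l : List Char) (acc : Nat)
    (h : ∃ j, sub <+: l.drop j) :
    1 ≤ PySem.Chars.count.go sub l.length l acc := by
  induction l generalizing acc with
  | nil =>
    obtain ⟨j, hj⟩ := h
    simp at hj
    exact absurd hj hsub
  | cons x t ih =>
    rw [List.length_cons, PySem.Chars.count.go]
    split
    · exact le_trans (Nat.succ_le_succ (Nat.zero_le acc)) (pv_go_le _ _ _ _)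
    · obtain ⟨j, hj⟩ := h
      cases j with
      | zero =>
        exact absurd ((List.isPrefixOf_iff_prefix (l₁ := sub) (l₂ := x :: t)).mpr (by simpa using hj))
          (by simp_all)
      | succ j => exact ih acc ⟨j, by simpa using hj⟩

-- the key characterisation: tag occurs in x iff its occurrence count is nonzero
theorem pv_isIn_iff_count_ne (tag x : String) :
    PySem.Str.isIn tag x = true ↔ PySem.Str.count x tag ≠ 0 := by
  by_cases hsub : tag.toList = []
  · constructor
    · intro _
      simp [PySem.Str.count_eq, PySem.Chars.count, hsub]
    · intro _
      rw [PySem.Str.isIn_iff_infix, hsub]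
      exact hsub ▸ List.nil_infix
  · rw [PySem.Str.isIn_iff_infix]
    constructor
    · intro h
      have hj : ∃ j, tag.toList <+: x.toList.drop j := by
        rw [PySem.Chars.exists_prefix_drop_iff_isIn, PySem.Chars.isIn_iff_infix]; exact h
      have := pv_go_pos tag.toList hsub x.toList 0 hj
      simp only [PySem.Str.count_eq, PySem.Chars.count, List.isEmpty_iff, hsub, if_false]
      omega
    · intro h
      by_contra hni
      have hni' : ∀ j, ¬ tag.toList <+: x.toList.drop j := by
        rw [← not_exists, PySem.Chars.exists_prefix_drop_iff_isIn, PySem.Chars.isIn_iff_infix]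
        exact hni
      have := pv_go_zero tag.toList x.toList.length x.toList 0 hni'
      simp only [PySem.Str.count_eq, PySem.Chars.count, List.isEmpty_iff, hsub, if_false] at h
      omega

-- A's loop leaves its state unchanged over elements that do not contain the tag
theorem pv_fold_skip (tag : String) (xs : List String) (st : Int × Option String)
    (h : ∀ y ∈ xs, PySem.Str.isIn tag y = false) :
    xs.foldl
      (fun (st : Int × Option String) x =>
        if PySem.Str.isIn tag x then (st.1 + (PySem.Str.count x tag : Int), some x) else st)
      st = st := by
  induction xs generalizing st with
  | nil => rfl
  | cons x t ih =>
    have hx := h x (List.mem_cons_self)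
    simp only [List.foldl_cons, hx, Bool.false_eq_true, if_false]
    exact ih st (fun y hy => h y (List.mem_cons_of_mem _ hy))

-- under Pre_ (total count = 1) the unique match is both first and last
theorem pv_main (tag : String) (A : List String)
    (h : (A.map (fun x => PySem.Str.count x tag)).sum = 1) :
    (A.foldl
      (fun (st : Int × Option String) x =>
        if PySem.Str.isIn tag x then (st.1 + (PySem.Str.count x tag : Int), some x) else st)
      (0, none)).2.getD ""
    = (A.find? (fun x => PySem.Str.isIn tag x)).getD "" := by
  induction A with
  | nil => simp at h
  | cons x t ih =>
    by_cases hx : PySem.Str.isIn tag x = true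
    · have hcx : PySem.Str.count x tag ≠ 0 := (pv_isIn_iff_count_ne tag x).mp hx
      simp only [List.map_cons, List.sum_cons] at h
      have ht : (t.map (fun y => PySem.Str.count y tag)).sum = 0 := by omega
      have hall : ∀ y ∈ t, PySem.Str.isIn tag y = false := by
        intro y hy
        have : PySem.Str.count y tag = 0 := by
          have := List.sum_eq_zero_iff.mp ht (PySem.Str.count y tag)
            (List.mem_map.mpr ⟨y, hy, rfl⟩)
          exact this
        cases hiy : PySem.Str.isIn tag y with
        | false => rfl
        | true => exact absurd this ((pv_isIn_iff_count_ne tag y).mp hiy)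
      simp only [List.foldl_cons, hx, if_true]
      rw [pv_fold_skip tag t _ hall, List.find?_cons_of_pos hx]
    · have hcx : PySem.Str.count x tag = 0 := by
        by_contra hc
        exact hx ((pv_isIn_iff_count_ne tag x).mpr hc)
      simp only [List.map_cons, List.sum_cons, hcx, Nat.zero_add] at h
      simp only [List.foldl_cons, hx, Bool.false_eq_true, if_false]
      rw [ih h, List.find?_cons_of_neg (by simpa using hx)]

-- Nat-sum / Int-sum of the counts agree (cast of the sum)
theorem pv_sum_cast (tag : String) (A : List String) :
    ((A.map (fun x => PySem.Str.count x tag)).sum : Int)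
      = (A.map (fun x => (PySem.Str.count x tag : Int))).sum := by
  induction A with
  | nil => simp
  | cons y t iht => simp only [List.map_cons, List.sum_cons, Nat.cast_add, iht]

-- ===== VERDICT (by name: the statement is the Claim_ definition above) =====
theorem find_once_spec : Claim_equal_find_once := by
  intro tag A _ hpre
  unfold Spec_find_once find_once find_once_alt
  have h : (A.map (fun x => PySem.Str.count x tag)).sum = 1 := by
    unfold Pre_find_once at hpre
    have hcast := pv_sum_cast tag A
    omega
  exact pv_main tag A h
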